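-- pv_equiv track=rewrite | github.com/Tjaub95/adventofcode2018 | day1/day1.py | first_repeat_sum
-- ===== SOURCE A (Python) =====
-- def first_repeat_sum(input: list) -> int:
--     sum = 0
--     known_values = set()
--
--     while True:
--         for item in input:
--             sum += int(item)
--             if sum in known_values:
--                 return sum
--             known_values.add(sum)
--
--     return sum
-- ===== SOURCE B (Python) =====
-- def first_repeat_sum(input: list) -> int:
--     # Build the per-cycle prefix sums and the cycle total.
--     sums = []
--     total = 0
--     for item in input:
--         total += int(item)
--         sums.append(total)
--     # Within the first cycle: first prefix sum equal to an earlier one.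
--     seen = set()
--     for s in sums:
--         if s in seen:
--             return s
--         seen.add(s)
--     if total == 0:
--         # Second cycle replays the same sums; the very first one repeats.
--         return sums[0]
--     # Cross-cycle repeat: s_i + d*total == s_j for some j and d >= 1; the
--     # stream hits the candidate with the lexicographically least (d, i) first.
--     best = None
--     for i, si in enumerate(sums):
--         for sj in sums:
--             diff = sj - si
--             if diff % total == 0:
--                 d = diff // total
--                 if d >= 1 and (best is None or (d, i) < best):
--                     best = (d, i)
--     d, i = best
--     return sums[i] + d * total
-- ===== Notes on version B (the rewrite author's own statement) =====
-- stated objective: alternative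
-- what changed: Instead of streaming the cycled input with a growing seen-set until a repeat, B computes the one-cycle prefix sums once, finds any within-first-cycle repeat with a single scan, and otherwise derives the first cross-cycle repeat arithmetically from pairs of prefix sums congruent modulo the cycle total (picking the candidate with the fewest cycles, then the earliest position).
import Mathlib
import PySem

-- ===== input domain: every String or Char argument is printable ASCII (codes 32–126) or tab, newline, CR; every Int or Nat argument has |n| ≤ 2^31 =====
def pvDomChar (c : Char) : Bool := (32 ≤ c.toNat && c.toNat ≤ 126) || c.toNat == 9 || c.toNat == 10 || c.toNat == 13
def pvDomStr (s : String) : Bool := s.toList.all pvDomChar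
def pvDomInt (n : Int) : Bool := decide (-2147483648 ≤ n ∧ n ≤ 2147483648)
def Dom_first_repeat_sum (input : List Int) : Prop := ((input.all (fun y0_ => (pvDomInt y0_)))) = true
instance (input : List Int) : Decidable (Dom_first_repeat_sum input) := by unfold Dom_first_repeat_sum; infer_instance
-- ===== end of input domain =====

-- B replaces A's unbounded stream simulation by a one-cycle scan plus a
-- closed-form choice among prefix-sum pairs congruent modulo the cycle total
-- (objective: alternative algorithm; equivalence proved on Pre_, where A terminates).

-- ===== PORT A =====
-- the body of A's 'for item in input' loop (returns inl on 'return sum')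
def innerA : List Int → Int → PySem.Set Int → Sum Int (Int × PySem.Set Int)
  | [], sum, known => Sum.inr (sum, known)
  | item :: rest, sum, known =>
      let sum' := sum + item
      if PySem.Set.contains known sum' then Sum.inl sum'
      else innerA rest sum' (PySem.Set.add known sum')

-- the 'while True' loop, made total with fuel (cycles); unreachable fuel-out returns sum
def loopA (input : List Int) : Nat → Int → PySem.Set Int → Int
  | 0, sum, _ => sum
  | fuel+1, sum, known =>
      match innerA input sum known with
      | Sum.inl r => r
      | Sum.inr (sum', known') => loopA input fuel sum' known'

def first_repeat_sum (input : List Int) : Int :=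
  loopA input (2 * (input.map Int.natAbs).sum + 2) 0 PySem.Set.empty

-- ===== PORT B =====
-- first loop of B: prefix sums and running total
def sumsTotalB (input : List Int) : List Int × Int :=
  input.foldl (fun acc item => (acc.1 ++ [acc.2 + item], acc.2 + item)) ([], 0)

-- second loop of B: first prefix sum already seen
def firstDupB : List Int → PySem.Set Int → Option Int
  | [], _ => none
  | s :: rest, seen =>
      if PySem.Set.contains seen s then some s
      else firstDupB rest (PySem.Set.add seen s)

-- Python's 'best is None or (d, i) < best'
def ltOptB (c : Int × Int) : Option (Int × Int) → Bool
  | none => true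
  | some b => c.1 < b.1 || (c.1 == b.1 && c.2 < b.2)

-- B's nested candidate loops
def bestLoopB (total : Int) (sums : List Int) : Option (Int × Int) :=
  (PySem.List.enumerate sums).foldl (fun best p =>
    sums.foldl (fun best sj =>
      let diff := sj - p.2
      if PySem.Int.mod diff total = 0 then
        let d := PySem.Int.floordiv diff total
        if 1 ≤ d && ltOptB (d, p.1) best then some (d, p.1) else best
      else best) best) none

def first_repeat_sum_alt (input : List Int) : Int :=
  let st := sumsTotalB input
  match firstDupB st.1 PySem.Set.empty with
  | some s => s
  | none =>
      if st.2 = 0 then st.1.headD 0   -- Python's sums[0]; empty input is outside Pre_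
      else
        match bestLoopB st.2 st.1 with
        | some di => PySem.List.pyGetD st.1 di.2 0 + di.1 * st.2
        | none => 0                    -- Python unpacks None and raises; outside Pre_

-- ===== PRECONDITION & SPEC =====
-- prefix sums of l starting from accumulator t (spec-side helper)
def psums : List Int → Int → List Int
  | [], _ => []
  | x :: xs, t => (t + x) :: psums xs (t + x)

-- Pre_ = exactly the inputs on which A terminates: input nonempty, and either the
-- cycle total is 0 or two one-cycle prefix sums are congruent modulo the total
-- (otherwise A's while-True loop never sees a repeated running sum and diverges).
def Pre_first_repeat_sum (input : List Int) : Prop :=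
  input ≠ [] ∧
    (input.sum = 0 ∨ ¬ (psums input 0).Pairwise (fun a b => ¬ (input.sum ∣ b - a)))

instance (input : List Int) : Decidable (Pre_first_repeat_sum input) := by
  unfold Pre_first_repeat_sum; infer_instance

def pvWitness_first_repeat_sum : List Int := [1, -1]

def Spec_first_repeat_sum (input : List Int) (out : Int) : Prop := out = first_repeat_sum_alt input
instance (input : List Int) (out : Int) : Decidable (Spec_first_repeat_sum input out) := by unfold Spec_first_repeat_sum; infer_instance

-- ===== CLAIM (what is proved, stated in full; the proofs are below) =====
def Claim_equal_first_repeat_sum : Prop := ∀ (input : List Int), Dom_first_repeat_sum input → Pre_first_repeat_sum input → Spec_first_repeat_sum input (first_repeat_sum input)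

-- ===== LEMMAS AND PROOFS =====

-- the infinite running-sum stream: uS l t = running sum after t stream steps
def uS (l : List Int) : Nat → Int
  | 0 => 0
  | t+1 => uS l t + l.getD (t % l.length) 0

-- wS l t = the value A's running sum takes at (0-based) stream step t
def wS (l : List Int) (t : Nat) : Int := uS l (t+1)

-- a collision (repeat) happens at step t
def ColA (l : List Int) (t : Nat) : Prop := ∃ t' < t, wS l t' = wS l t

@[reducible] def decColA (l : List Int) : DecidablePred (ColA l) := fun _t => by
  unfold ColA; infer_instance

def tstar (l : List Int) (h : ∃ t, ColA l t) : Nat := @Nat.find (ColA l) (decColA l) h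

theorem tstar_col (l : List Int) (h : ∃ t, ColA l t) : ColA l (tstar l h) :=
  @Nat.find_spec (ColA l) (decColA l) h

theorem tstar_min (l : List Int) (h : ∃ t, ColA l t) {t : Nat} (ht : t < tstar l h) :
    ¬ ColA l t := @Nat.find_min (ColA l) (decColA l) h t ht

theorem tstar_le (l : List Int) (h : ∃ t, ColA l t) {t : Nat} (ht : ColA l t) :
    tstar l h ≤ t := @Nat.find_le t (ColA l) (decColA l) h ht

theorem length_psums (l : List Int) (t : Int) : (psums l t).length = l.length := by
  induction l generalizing t with
  | nil => rfl
  | cons x xs ih => simp [psums, ih]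

theorem psums_getD (l : List Int) (t : Int) (i : Nat) (hi : i < l.length) :
    (psums l t).getD i 0 = t + (l.take (i+1)).sum := by
  induction l generalizing t i with
  | nil => simp at hi
  | cons x xs ih =>
      cases i with
      | zero => simp [psums]
      | succ i =>
          simp only [psums, List.getD_cons_succ, List.take_succ_cons, List.sum_cons]
          rw [ih (t + x) i (by simpa using hi)]
          ring

theorem uS_take (l : List Int) (t : Nat) (ht : t ≤ l.length) :
    uS l t = (l.take t).sum := by
  induction t with
  | zero => simp [uS]
  | succ t ih =>
      have ht' : t < l.length := ht
      rw [show t + 1 = t.succ from rfl]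
      show uS l t + l.getD (t % l.length) 0 = (l.take (t+1)).sum
      rw [ih (le_of_lt ht'), Nat.mod_eq_of_lt ht', List.getD_eq_getElem l 0 ht',
        List.sum_take_succ l t ht']

theorem uS_add_len (l : List Int) (_hn : l ≠ []) (t : Nat) :
    uS l (t + l.length) = uS l t + l.sum := by
  induction t with
  | zero =>
      simpa [uS, List.take_length] using uS_take l l.length le_rfl
  | succ t ih =>
      have : t + 1 + l.length = (t + l.length) + 1 := by omega
      rw [this]
      show uS l (t + l.length) + l.getD ((t + l.length) % l.length) 0 = _
      rw [ih, Nat.add_mod_right]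
      show _ = uS l t + l.getD (t % l.length) 0 + l.sum
      ring

theorem uS_add_mul (l : List Int) (_hn : l ≠ []) (t c : Nat) :
    uS l (t + c * l.length) = uS l t + (c : Int) * l.sum := by
  induction c with
  | zero => simp
  | succ c ih =>
      have : t + (c + 1) * l.length = (t + c * l.length) + l.length := by ring
      rw [this, uS_add_len l _hn, ih]
      push_cast
      ring

theorem wS_closed (l : List Int) (hn : l ≠ []) (c i : Nat) (hi : i < l.length) :
    wS l (c * l.length + i) = (psums l 0).getD i 0 + (c : Int) * l.sum := by
  unfold wS
  have h1 : c * l.length + i + 1 = (i + 1) + c * l.length := by ring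
  rw [h1, uS_add_mul l hn, uS_take l (i+1) (by omega), psums_getD l 0 i hi]
  ring

-- A-side: the inner for-loop
theorem innerA_run (l : List Int) (_hn : l ≠ []) (h : ∃ t, ColA l t) :
    ∀ (k i c : Nat) (known : PySem.Set Int), i ≤ l.length → k = l.length - i →
    (∀ x : Int, PySem.Set.contains known x = true ↔ ∃ t < c * l.length + i, wS l t = x) →
    (∀ t < c * l.length + i, ¬ ColA l t) →
    (tstar l h < c * l.length + l.length →
        innerA (l.drop i) (uS l (c * l.length + i)) known = Sum.inl (wS l (tstar l h)))
    ∧ (c * l.length + l.length ≤ tstar l h →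
        ∃ known', innerA (l.drop i) (uS l (c * l.length + i)) known
            = Sum.inr (uS l (c * l.length + l.length), known')
          ∧ ∀ x : Int, PySem.Set.contains known' x = true
              ↔ ∃ t < c * l.length + l.length, wS l t = x) := by
  intro k
  induction k with
  | zero =>
      intro i c known hi hk hmem hno
      have hieq : i = l.length := by omega
      subst hieq
      rw [List.drop_length]
      refine ⟨fun htl => absurd (tstar_col l h) (hno _ htl), fun _ => ⟨known, rfl, hmem⟩⟩
  | succ k ih =>
      intro i c known hi hk hmem hno
      have hilt : i < l.length := by omega
      have hmod : (c * l.length + i) % l.length = i := by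
        rw [Nat.add_comm, Nat.add_mul_mod_self_right]
        exact Nat.mod_eq_of_lt hilt
      have hstep : uS l (c * l.length + i) + l[i] = wS l (c * l.length + i) := by
        unfold wS
        have hr : uS l ((c * l.length + i) + 1)
            = uS l (c * l.length + i) + l.getD ((c * l.length + i) % l.length) 0 := rfl
        rw [hr, hmod, List.getD_eq_getElem l 0 hilt]
      rw [List.drop_eq_getElem_cons hilt]
      simp only [innerA]
      by_cases hc : PySem.Set.contains known (uS l (c * l.length + i) + l[i]) = true
      · obtain ⟨t, htl, hwt⟩ := (hmem _).mp hc
        rw [hstep] at hwt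
        have hcol : ColA l (c * l.length + i) := ⟨t, htl, hwt⟩
        have hle := tstar_le l h hcol
        have hnl : ¬ tstar l h < c * l.length + i :=
          fun hlt => (hno _ hlt) (tstar_col l h)
        have hts : tstar l h = c * l.length + i := by omega
        constructor
        · intro _
          rw [if_pos hc, hstep, hts]
        · intro hge
          exact absurd hge (by omega)
      · rw [if_neg hc]
        have hnc : ¬ ColA l (c * l.length + i) := by
          rintro ⟨t, htl, hwt⟩
          exact hc ((hmem _).mpr ⟨t, htl, hwt.trans hstep.symm⟩)
        have hno' : ∀ t < c * l.length + (i + 1), ¬ ColA l t := by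
          intro t htl
          rcases (by omega : t < c * l.length + i ∨ t = c * l.length + i) with h1 | h1
          · exact hno t h1
          · subst h1; exact hnc
        have hmem' : ∀ x : Int,
            PySem.Set.contains (PySem.Set.add known (uS l (c * l.length + i) + l[i])) x = true
              ↔ ∃ t < c * l.length + (i + 1), wS l t = x := by
          intro x
          rw [PySem.Set.contains_iff, PySem.Set.mem_add]
          constructor
          · rintro (hx | hx)
            · obtain ⟨t, htl, hwt⟩ := (hmem x).mp ((PySem.Set.contains_iff _ _).mpr hx)
              exact ⟨t, by omega, hwt⟩
            · exact ⟨c * l.length + i, by omega, by rw [hx, ← hstep]⟩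
          · rintro ⟨t, htl, hwt⟩
            rcases (by omega : t < c * l.length + i ∨ t = c * l.length + i) with h1 | h1
            · exact Or.inl ((PySem.Set.contains_iff _ _).mp ((hmem x).mpr ⟨t, h1, hwt⟩))
            · subst h1
              exact Or.inr (by rw [← hwt, ← hstep])
        have harg : uS l (c * l.length + (i + 1)) = uS l (c * l.length + i) + l[i] := by
          have h2 : c * l.length + (i + 1) = (c * l.length + i) + 1 := by omega
          rw [h2]
          have hr : uS l ((c * l.length + i) + 1)
              = uS l (c * l.length + i) + l.getD ((c * l.length + i) % l.length) 0 := rfl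
          rw [hr, hmod, List.getD_eq_getElem l 0 hilt]
        have hihres := ih (i + 1) c (PySem.Set.add known (uS l (c * l.length + i) + l[i]))
          (by omega) (by omega) hmem' hno'
        rw [harg] at hihres
        exact hihres

-- A-side: the while-True loop
theorem loopA_run (l : List Int) (hn : l ≠ []) (h : ∃ t, ColA l t) :
    ∀ (fuel c : Nat) (known : PySem.Set Int),
    (∀ x : Int, PySem.Set.contains known x = true ↔ ∃ t < c * l.length, wS l t = x) →
    (∀ t < c * l.length, ¬ ColA l t) →
    tstar l h < (c + fuel) * l.length →
    loopA l fuel (uS l (c * l.length)) known = wS l (tstar l h) := by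
  intro fuel
  induction fuel with
  | zero =>
      intro c known hmem hno hb
      rw [Nat.add_zero] at hb
      exact absurd (tstar_col l h) (hno _ hb)
  | succ f ih =>
      intro c known hmem hno hb
      have hrun := innerA_run l hn h l.length 0 c known (by omega) (by omega)
        (by simpa using hmem) (by simpa using hno)
      rw [List.drop_zero, Nat.add_zero] at hrun
      by_cases htl : tstar l h < c * l.length + l.length
      · have heq := hrun.1 htl
        simp only [loopA, heq]
      · have hge : c * l.length + l.length ≤ tstar l h := by omega
        obtain ⟨known', heq, hmem'⟩ := hrun.2 hge
        simp only [loopA, heq]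
        have hcs : c * l.length + l.length = (c + 1) * l.length := by ring
        rw [hcs] at heq hmem' ⊢
        have hno' : ∀ t < (c + 1) * l.length, ¬ ColA l t := by
          intro t htlt
          exact tstar_min l h (by omega)
        exact ih (c + 1) known' hmem' hno' (by
          have : (c + 1 + f) * l.length = (c + (f + 1)) * l.length := by ring
          omega)

-- each |prefix sum| is at most the sum of |input values|
theorem abs_take_sum_le (l : List Int) (k : Nat) :
    ((l.take k).sum).natAbs ≤ (l.map Int.natAbs).sum := by
  induction l generalizing k with
  | nil => simp
  | cons x xs ih =>
      cases k with
      | zero => simp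
      | succ k =>
          simp only [List.take_succ_cons, List.sum_cons, List.map_cons]
          calc (x + (xs.take k).sum).natAbs
              ≤ x.natAbs + ((xs.take k).sum).natAbs := Int.natAbs_add_le _ _
            _ ≤ x.natAbs + (xs.map Int.natAbs).sum := by
                  have := ih k; omega

-- |psums[i]| is bounded by the sum of |input values|
theorem psum_abs_le (l : List Int) (i : Nat) (hi : i < l.length) :
    ((psums l 0).getD i 0).natAbs ≤ (l.map Int.natAbs).sum := by
  rw [psums_getD l 0 i hi]
  simpa using abs_take_sum_le l (i+1)

-- Pre_ gives a collision within the fuel bound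
theorem exists_col_of_pre (l : List Int) (hp : Pre_first_repeat_sum l) :
    ∃ t, ColA l t ∧ t < (2 * (l.map Int.natAbs).sum + 2) * l.length := by
  obtain ⟨hne, hp2⟩ := hp
  have hn : 0 < l.length := List.length_pos_iff.mpr hne
  set S := (l.map Int.natAbs).sum with hS
  have hFn : 2 * l.length ≤ (2 * S + 2) * l.length := by
    have := Nat.mul_le_mul_right l.length (show 2 ≤ 2 * S + 2 by omega)
    simpa using this
  by_cases hT : l.sum = 0
  · -- total 0: step length collides with step 0
    refine ⟨l.length, ⟨0, hn, ?_⟩, by omega⟩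
    have h1 := wS_closed l hne 1 0 hn
    have h0 := wS_closed l hne 0 0 hn
    simp only [Nat.one_mul, Nat.zero_mul, Nat.add_zero] at h1 h0
    rw [h0, h1, hT]
    ring
  · rcases hp2 with hT0 | hpair
    · exact absurd hT0 hT
    rw [List.pairwise_iff_getElem] at hpair
    push_neg at hpair
    obtain ⟨i, j, hi, hj, hij, hdvd⟩ := hpair
    rw [length_psums] at hi hj
    obtain ⟨e, he⟩ := hdvd
    have hgi : (psums l 0)[i]'(by rw [length_psums]; exact hi) = (psums l 0).getD i 0 := by
      rw [List.getD_eq_getElem _ _ (by rw [length_psums]; exact hi)]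
    have hgj : (psums l 0)[j]'(by rw [length_psums]; exact hj) = (psums l 0).getD j 0 := by
      rw [List.getD_eq_getElem _ _ (by rw [length_psums]; exact hj)]
    rw [hgi, hgj] at he
    set pi := (psums l 0).getD i 0 with hpi
    set pj := (psums l 0).getD j 0 with hpj
    -- bound on the multiplier e
    have habs : e.natAbs ≤ 2 * S := by
      have h1 : (l.sum * e).natAbs = l.sum.natAbs * e.natAbs := Int.natAbs_mul _ _
      have h2 : (pj - pi).natAbs ≤ pj.natAbs + pi.natAbs := Int.natAbs_sub_le _ _
      have h3 : pj.natAbs ≤ S := psum_abs_le l j hj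
      have h4 : pi.natAbs ≤ S := psum_abs_le l i hi
      have h5 : 1 ≤ l.sum.natAbs := by
        rcases Nat.eq_zero_or_pos l.sum.natAbs with h | h
        · exact absurd (Int.natAbs_eq_zero.mp h) hT
        · exact h
      have h6 : e.natAbs ≤ l.sum.natAbs * e.natAbs := Nat.le_mul_of_pos_left _ h5
      rw [← he] at h1
      omega
    rcases lt_trichotomy e 0 with he0 | he0 | he0
    · -- e < 0 : ps[i] = ps[j] + m*sum, collide at m*len + j with earlier witness i
      set m := e.natAbs with hm
      have hm1 : 1 ≤ m := by
        have : e ≠ 0 := ne_of_lt he0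
        have := Int.natAbs_pos.mpr this
        omega
      have hcast : (m : Int) = -e := by
        rw [hm, Int.ofNat_natAbs_of_nonpos (le_of_lt he0)]
      refine ⟨m * l.length + j, ⟨i, ?_, ?_⟩, ?_⟩
      · calc i < l.length := hi
          _ ≤ m * l.length := Nat.le_mul_of_pos_left _ hm1
          _ ≤ m * l.length + j := Nat.le_add_right _ _
      · have hwi := wS_closed l hne 0 i hi
        have hwj := wS_closed l hne m j hj
        simp only [Nat.zero_mul, Nat.zero_add] at hwi
        rw [hwi, hwj, hcast, ← hpi, ← hpj]
        have : pj - pi = l.sum * e := he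
        push_cast
        linarith
      · have h7 : m * l.length + j < (m + 1) * l.length := by
          have : (m + 1) * l.length = m * l.length + l.length := by ring
          omega
        have h8 : (m + 1) * l.length ≤ (2 * S + 2) * l.length :=
          Nat.mul_le_mul_right _ (by omega)
        omega
    · -- e = 0 : duplicate inside the first cycle
      refine ⟨j, ⟨i, hij, ?_⟩, by omega⟩
      have hwi := wS_closed l hne 0 i hi
      have hwj := wS_closed l hne 0 j hj
      simp only [Nat.zero_mul, Nat.zero_add] at hwi hwj
      rw [hwi, hwj, ← hpi, ← hpj]
      have : pj - pi = 0 := by rw [he, he0]; ring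
      linarith
    · -- e > 0 : ps[j] = ps[i] + m*sum, collide at m*len + i with earlier witness j
      set m := e.natAbs with hm
      have hm1 : 1 ≤ m := by
        have := Int.natAbs_pos.mpr (ne_of_gt he0)
        omega
      have hcast : (m : Int) = e := by
        rw [hm, Int.natAbs_of_nonneg (le_of_lt he0)]
      refine ⟨m * l.length + i, ⟨j, ?_, ?_⟩, ?_⟩
      · calc j < l.length := hj
          _ ≤ m * l.length := Nat.le_mul_of_pos_left _ hm1
          _ ≤ m * l.length + i := Nat.le_add_right _ _
      · have hwj := wS_closed l hne 0 j hj
        have hwi := wS_closed l hne m i hi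
        simp only [Nat.zero_mul, Nat.zero_add] at hwj
        rw [hwj, hwi, hcast, ← hpi, ← hpj]
        linear_combination he
      · have h7 : m * l.length + i < (m + 1) * l.length := by
          have : (m + 1) * l.length = m * l.length + l.length := by ring
          omega
        have h8 : (m + 1) * l.length ≤ (2 * S + 2) * l.length :=
          Nat.mul_le_mul_right _ (by omega)
        omega

theorem A_eq (l : List Int) (hp : Pre_first_repeat_sum l) (h : ∃ t, ColA l t) :
    first_repeat_sum l = wS l (tstar l h) := by
  obtain ⟨t0, hc0, hb0⟩ := exists_col_of_pre l hp
  have hne : l ≠ [] := hp.1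
  unfold first_repeat_sum
  have h0 : (0 : Int) = uS l (0 * l.length) := by simp [uS]
  rw [h0]
  apply loopA_run l hne h _ 0 PySem.Set.empty
  · intro x
    constructor
    · intro hx
      exact absurd hx (by simp [PySem.Set.empty, PySem.Set.contains])
    · rintro ⟨t, ht, -⟩
      omega
  · intro t ht
    exact absurd ht (by omega)
  · have := tstar_le l h hc0
    simp only [Nat.zero_add]
    omega

-- B-side -------------------------------------------------------------

theorem sumsTotalB_gen (l : List Int) :
    ∀ (acc : List Int) (t : Int),
      l.foldl (fun acc item => (acc.1 ++ [acc.2 + item], acc.2 + item)) (acc, t)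
        = (acc ++ psums l t, t + l.sum) := by
  induction l with
  | nil => intro acc t; simp [psums]
  | cons x xs ih =>
      intro acc t
      simp only [List.foldl_cons, List.sum_cons, psums]
      rw [ih (acc ++ [t + x]) (t + x)]
      simp
      ring

theorem sumsTotalB_eq (l : List Int) : sumsTotalB l = (psums l 0, l.sum) := by
  unfold sumsTotalB
  simpa using sumsTotalB_gen l [] 0

theorem firstDup_run (l : List Int) (hn : l ≠ []) (h : ∃ t, ColA l t) :
    ∀ (k i : Nat) (seen : PySem.Set Int), i ≤ l.length → k = l.length - i →
    (∀ x : Int, PySem.Set.contains seen x = true ↔ ∃ t < i, wS l t = x) →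
    (∀ t < i, ¬ ColA l t) →
    (tstar l h < l.length →
        firstDupB ((psums l 0).drop i) seen = some (wS l (tstar l h)))
    ∧ (l.length ≤ tstar l h → firstDupB ((psums l 0).drop i) seen = none) := by
  intro k
  induction k with
  | zero =>
      intro i seen hi hk hmem hno
      have hieq : i = l.length := by omega
      subst hieq
      have hdrop : (psums l 0).drop l.length = [] :=
        List.drop_eq_nil_of_le (by rw [length_psums])
      rw [hdrop]
      exact ⟨fun htl => absurd (tstar_col l h) (hno _ htl), fun _ => rfl⟩
  | succ k ih =>
      intro i seen hi hk hmem hno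
      have hilt : i < l.length := by omega
      have hilt' : i < (psums l 0).length := by rw [length_psums]; exact hilt
      have hpsw : (psums l 0)[i] = wS l i := by
        have := wS_closed l hn 0 i hilt
        simp only [Nat.zero_mul, Nat.zero_add, Int.natCast_zero, Int.zero_mul,
          Int.add_zero] at this
        rw [this, List.getD_eq_getElem _ _ hilt']
      rw [List.drop_eq_getElem_cons hilt']
      simp only [firstDupB]
      by_cases hc : PySem.Set.contains seen ((psums l 0)[i]) = true
      · obtain ⟨t, htl, hwt⟩ := (hmem _).mp hc
        rw [hpsw] at hwt
        have hcol : ColA l i := ⟨t, htl, hwt⟩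
        have hle := tstar_le l h hcol
        have hnl : ¬ tstar l h < i := fun hlt => (hno _ hlt) (tstar_col l h)
        have hts : tstar l h = i := by omega
        constructor
        · intro _
          rw [if_pos hc, hpsw, hts]
        · intro hge
          exact absurd hge (by omega)
      · rw [if_neg hc]
        have hnc : ¬ ColA l i := by
          rintro ⟨t, htl, hwt⟩
          exact hc ((hmem _).mpr ⟨t, htl, hwt.trans hpsw.symm⟩)
        have hno' : ∀ t < i + 1, ¬ ColA l t := by
          intro t htl
          rcases (by omega : t < i ∨ t = i) with h1 | h1
          · exact hno t h1
          · subst h1; exact hnc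
        have hmem' : ∀ x : Int,
            PySem.Set.contains (PySem.Set.add seen ((psums l 0)[i])) x = true
              ↔ ∃ t < i + 1, wS l t = x := by
          intro x
          rw [PySem.Set.contains_iff, PySem.Set.mem_add]
          constructor
          · rintro (hx | hx)
            · obtain ⟨t, htl, hwt⟩ := (hmem x).mp ((PySem.Set.contains_iff _ _).mpr hx)
              exact ⟨t, by omega, hwt⟩
            · exact ⟨i, by omega, by rw [hx, ← hpsw]⟩
          · rintro ⟨t, htl, hwt⟩
            rcases (by omega : t < i ∨ t = i) with h1 | h1
            · exact Or.inl ((PySem.Set.contains_iff _ _).mp ((hmem x).mpr ⟨t, h1, hwt⟩))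
            · subst h1
              exact Or.inr (by rw [← hwt, ← hpsw])
        exact ih (i + 1) _ (by omega) (by omega) hmem' hno'

-- the cross-cycle candidate set
def CmP (l : List Int) (d i : Nat) : Prop :=
  1 ≤ d ∧ i < l.length ∧
    ∃ j < l.length, (psums l 0).getD j 0 = (psums l 0).getD i 0 + (d : Int) * l.sum

@[reducible] def decCmP (l : List Int) (d : Nat) : DecidablePred (CmP l d) := fun _i => by
  unfold CmP; infer_instance

-- collision characterisation past the first cycle (no first-cycle duplicate, total ≠ 0)
theorem col_char (l : List Int) (hn : l ≠ []) (_hT : l.sum ≠ 0)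
    (hnodup : ∀ t < l.length, ¬ ColA l t) (c i : Nat) (hi : i < l.length) (hc : 1 ≤ c) :
    ColA l (c * l.length + i) ↔ ∃ d, 1 ≤ d ∧ d ≤ c ∧ CmP l d i := by
  have hn0 : 0 < l.length := List.length_pos_iff.mpr hn
  constructor
  · rintro ⟨t', ht', heq⟩
    obtain ⟨c', i', rfl, hi'⟩ : ∃ c' i', t' = c' * l.length + i' ∧ i' < l.length := by
      refine ⟨t' / l.length, t' % l.length, ?_, Nat.mod_lt _ hn0⟩
      conv_lhs => rw [← Nat.div_add_mod t' l.length]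
      rw [Nat.mul_comm]
    have hw' := wS_closed l hn c' i' hi'
    have hwci := wS_closed l hn c i hi
    rw [hw', hwci] at heq
    have hc'le : c' ≤ c := by
      by_contra hgt
      have hx1 : (c + 1) * l.length ≤ c' * l.length :=
        Nat.mul_le_mul_right _ (by omega)
      have hx2 : (c + 1) * l.length = c * l.length + l.length := by ring
      omega
    by_cases hcc : c' = c
    · subst hcc
      have hii : i' < i := by omega
      have hpp : (psums l 0).getD i' 0 = (psums l 0).getD i 0 := by omega
      have hcolI : ColA l i := by
        refine ⟨i', hii, ?_⟩
        have h1 := wS_closed l hn 0 i' hi'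
        have h2 := wS_closed l hn 0 i hi
        simp only [Nat.zero_mul, Nat.zero_add, Int.natCast_zero, Int.zero_mul,
          Int.add_zero] at h1 h2
        rw [h1, h2, hpp]
      exact absurd hcolI (hnodup i hi)
    · have hc'lt : c' < c := by omega
      refine ⟨c - c', by omega, by omega, by omega, hi, i', hi', ?_⟩
      have hcast : ((c - c' : Nat) : Int) = (c : Int) - (c' : Nat) := by
        push_cast [Nat.cast_sub (le_of_lt hc'lt)]
        ring
      rw [hcast]
      linarith [heq]
  · rintro ⟨d, hd1, hdc, -, -, j, hj, hps⟩
    refine ⟨(c - d) * l.length + j, ?_, ?_⟩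
    · have h1 : (c - d) * l.length + j < (c - d + 1) * l.length := by
        have : (c - d + 1) * l.length = (c - d) * l.length + l.length := by ring
        omega
      have h2 : (c - d + 1) * l.length ≤ c * l.length :=
        Nat.mul_le_mul_right _ (by omega)
      omega
    · have hwj := wS_closed l hn (c - d) j hj
      have hwi := wS_closed l hn c i hi
      rw [hwj, hwi]
      have hcast : ((c - d : Nat) : Int) = (c : Int) - (d : Nat) := by
        push_cast [Nat.cast_sub hdc]
        ring
      rw [hcast]
      linear_combination hps

-- strict lexicographic order used by B
def lltP (a b : Int × Int) : Prop := a.1 < b.1 ∨ (a.1 = b.1 ∧ a.2 < b.2)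

theorem llt_trans {a b c : Int × Int} (h1 : lltP a b) (h2 : lltP b c) : lltP a c := by
  unfold lltP at *; rcases a with ⟨a1, a2⟩; rcases b with ⟨b1, b2⟩; rcases c with ⟨c1, c2⟩
  simp_all only []; omega

theorem llt_total (a b : Int × Int) : lltP a b ∨ a = b ∨ lltP b a := by
  unfold lltP; rcases a with ⟨a1, a2⟩; rcases b with ⟨b1, b2⟩
  simp only [Prod.mk.injEq]; omega

-- contract of a min-selection step over a candidate list
def StepSpec (f : Option (Int × Int) → Option (Int × Int)) (cands : List (Int × Int)) : Prop :=
  ∀ acc, (f acc = none → acc = none ∧ cands = []) ∧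
    ∀ m, f acc = some m →
      (acc = some m ∨ m ∈ cands) ∧ (∀ c ∈ cands, ¬ lltP c m) ∧
      (∀ a, acc = some a → ¬ lltP a m)

theorem llt_irrefl (a : Int × Int) : ¬ lltP a a := by
  rcases a with ⟨x, y⟩; unfold lltP; dsimp only; omega

theorem llt_asymm {a b : Int × Int} (h1 : lltP a b) : ¬ lltP b a :=
  fun h2 => llt_irrefl a (llt_trans h1 h2)

theorem nllt_trans {x y z : Int × Int} (h1 : ¬ lltP x y) (h2 : ¬ lltP y z) :
    ¬ lltP x z := by
  intro hxz
  rcases llt_total x y with hc | hc | hc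
  · exact h1 hc
  · subst hc; exact h2 hxz
  · exact h2 (llt_trans hc hxz)

theorem stepspec_comp {f g : Option (Int × Int) → Option (Int × Int)}
    {L1 L2 : List (Int × Int)} (hf : StepSpec f L1) (hg : StepSpec g L2) :
    StepSpec (fun acc => g (f acc)) (L1 ++ L2) := by
  intro acc
  constructor
  · intro hnone
    obtain ⟨hfn, hL2⟩ := (hg (f acc)).1 hnone
    obtain ⟨han, hL1⟩ := (hf acc).1 hfn
    exact ⟨han, by rw [hL1, hL2, List.nil_append]⟩
  · intro m hm
    obtain ⟨hmem2, hnlt2, hacc2⟩ := (hg (f acc)).2 m hm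
    rcases hmem2 with hfa | hmL2
    · obtain ⟨hmem1, hnlt1, hacc1⟩ := (hf acc).2 m hfa
      refine ⟨?_, ?_, hacc1⟩
      · rcases hmem1 with h1 | h1
        · exact Or.inl h1
        · exact Or.inr (List.mem_append.mpr (Or.inl h1))
      · intro cc hcc
        rcases List.mem_append.mp hcc with h1 | h1
        · exact hnlt1 cc h1
        · exact hnlt2 cc h1
    · refine ⟨Or.inr (List.mem_append.mpr (Or.inr hmL2)), ?_, ?_⟩
      · intro cc hcc
        rcases List.mem_append.mp hcc with h1 | h1
        · cases hfa2 : f acc with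
          | none => exact absurd h1 (by rw [((hf acc).1 hfa2).2]; simp)
          | some b =>
              obtain ⟨-, hnlt1, -⟩ := (hf acc).2 b hfa2
              exact nllt_trans (hnlt1 cc h1) (hacc2 b hfa2)
        · exact hnlt2 cc h1
      · intro a ha
        cases hfa2 : f acc with
        | none => exact absurd ha (by rw [((hf acc).1 hfa2).1]; simp)
        | some b =>
            obtain ⟨-, -, hacc1⟩ := (hf acc).2 b hfa2
            exact nllt_trans (hacc1 a ha) (hacc2 b hfa2)

theorem stepspec_id : StepSpec (fun acc => acc) [] := by
  intro acc
  refine ⟨fun h => ⟨h, rfl⟩, fun m hm => ⟨Or.inl hm, by simp, ?_⟩⟩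
  intro a ha
  rw [ha] at hm
  injection hm with h
  subst h
  exact llt_irrefl _

theorem stepspec_foldl {α : Type} (s : α → Option (Int × Int) → Option (Int × Int))
    (cnd : α → List (Int × Int)) (hs : ∀ a, StepSpec (s a) (cnd a)) :
    ∀ (xs : List α), StepSpec (fun acc => xs.foldl (fun b a => s a b) acc) (xs.flatMap cnd) := by
  intro xs
  induction xs with
  | nil => simpa using stepspec_id
  | cons a xs ih =>
      have hcomp := stepspec_comp (hs a) ih
      simpa [List.flatMap_cons, List.foldl_cons] using hcomp

theorem stepspec_congr {f g : Option (Int × Int) → Option (Int × Int)}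
    {L : List (Int × Int)} (hfg : ∀ acc, f acc = g acc) (hg : StepSpec g L) :
    StepSpec f L := by
  intro acc
  rw [hfg acc]
  exact hg acc

theorem ltOptB_none (c : Int × Int) : ltOptB c none = true := rfl

theorem ltOptB_some (c m : Int × Int) : ltOptB c (some m) = true ↔ lltP c m := by
  rcases c with ⟨c1, c2⟩; rcases m with ⟨m1, m2⟩
  simp [ltOptB, lltP]

-- the candidates contributed by one inner-loop iteration of B
def cnd1 (total si ival sj : Int) : List (Int × Int) :=
  if PySem.Int.mod (sj - si) total = 0 ∧ 1 ≤ PySem.Int.floordiv (sj - si) total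
  then [(PySem.Int.floordiv (sj - si) total, ival)] else []

theorem step_single (total si ival sj : Int) :
    StepSpec (fun best =>
      let diff := sj - si
      if PySem.Int.mod diff total = 0 then
        let d := PySem.Int.floordiv diff total
        if 1 ≤ d && ltOptB (d, ival) best then some (d, ival) else best
      else best) (cnd1 total si ival sj) := by
  by_cases hm0 : PySem.Int.mod (sj - si) total = 0
  · by_cases hd1 : 1 ≤ PySem.Int.floordiv (sj - si) total
    · have hc : cnd1 total si ival sj
          = [(PySem.Int.floordiv (sj - si) total, ival)] := by
        rw [cnd1, if_pos ⟨hm0, hd1⟩]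
      intro acc
      rw [hc]
      cases acc with
      | none =>
          have hres : (if PySem.Int.mod (sj - si) total = 0 then
              if 1 ≤ PySem.Int.floordiv (sj - si) total
                  && ltOptB (PySem.Int.floordiv (sj - si) total, ival) none
                then some (PySem.Int.floordiv (sj - si) total, ival) else none
              else none)
              = some (PySem.Int.floordiv (sj - si) total, ival) := by
            rw [if_pos hm0, if_pos (by simp [hd1, ltOptB_none])]
          refine ⟨fun habs => ?_, fun m hm => ?_⟩
          · simp only [] at habs; rw [hres] at habs; cases habs
          · simp only [] at hm; rw [hres] at hm
            injection hm with hm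
            refine ⟨Or.inr (by rw [← hm]; exact List.mem_singleton_self _), ?_, ?_⟩
            · intro c hcc
              rw [List.mem_singleton] at hcc
              subst hcc; rw [← hm]; exact llt_irrefl _
            · intro a ha; cases ha
      | some m0 =>
          by_cases hlt : lltP (PySem.Int.floordiv (sj - si) total, ival) m0
          · have hres : (if PySem.Int.mod (sj - si) total = 0 then
                if 1 ≤ PySem.Int.floordiv (sj - si) total
                    && ltOptB (PySem.Int.floordiv (sj - si) total, ival) (some m0)
                  then some (PySem.Int.floordiv (sj - si) total, ival) else some m0
                else some m0)
                = some (PySem.Int.floordiv (sj - si) total, ival) := by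
              rw [if_pos hm0, if_pos (by simp [hd1, (ltOptB_some _ _).mpr hlt])]
            refine ⟨fun habs => ?_, fun m hm => ?_⟩
            · simp only [] at habs; rw [hres] at habs; cases habs
            · simp only [] at hm; rw [hres] at hm
              injection hm with hm
              refine ⟨Or.inr (by rw [← hm]; exact List.mem_singleton_self _), ?_, ?_⟩
              · intro c hcc
                rw [List.mem_singleton] at hcc
                subst hcc; rw [← hm]; exact llt_irrefl _
              · intro a ha
                injection ha with ha
                subst ha; rw [← hm]; exact llt_asymm hlt
          · have hres : (if PySem.Int.mod (sj - si) total = 0 then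
                if 1 ≤ PySem.Int.floordiv (sj - si) total
                    && ltOptB (PySem.Int.floordiv (sj - si) total, ival) (some m0)
                  then some (PySem.Int.floordiv (sj - si) total, ival) else some m0
                else some m0) = some m0 := by
              rw [if_pos hm0]
              have : ltOptB (PySem.Int.floordiv (sj - si) total, ival) (some m0) = false := by
                rcases hb : ltOptB (PySem.Int.floordiv (sj - si) total, ival) (some m0) with _ | _
                · rfl
                · exact absurd ((ltOptB_some _ _).mp hb) hlt
              rw [if_neg (by simp [this])]
            refine ⟨fun habs => ?_, fun m hm => ?_⟩
            · simp only [] at habs; rw [hres] at habs; cases habs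
            · simp only [] at hm; rw [hres] at hm
              injection hm with hm
              subst hm
              refine ⟨Or.inl rfl, ?_, ?_⟩
              · intro c hcc
                rw [List.mem_singleton] at hcc
                subst hcc; exact hlt
              · intro a ha
                injection ha with ha
                subst ha; exact llt_irrefl _
    · have hc : cnd1 total si ival sj = [] := by
        rw [cnd1, if_neg (by intro hx; exact hd1 hx.2)]
      rw [hc]
      refine stepspec_congr (fun acc => ?_) stepspec_id
      simp only [if_pos hm0]
      rw [if_neg (by simp [hd1])]
  · have hc : cnd1 total si ival sj = [] := by
      rw [cnd1, if_neg (by intro hx; exact hm0 hx.1)]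
    rw [hc]
    refine stepspec_congr (fun acc => ?_) stepspec_id
    simp only [if_neg hm0]

-- all candidates inspected by B's nested loops
def allC (total : Int) (sums : List Int) : List (Int × Int) :=
  (PySem.List.enumerate sums).flatMap
    (fun p => sums.flatMap (fun sj => cnd1 total p.2 p.1 sj))

theorem bestLoopB_minspec (total : Int) (sums : List Int) :
    (bestLoopB total sums = none → allC total sums = []) ∧
    (∀ m, bestLoopB total sums = some m →
      m ∈ allC total sums ∧ ∀ c ∈ allC total sums, ¬ lltP c m) := by
  have hinner : ∀ p : Int × Int,
      StepSpec (fun acc => sums.foldl (fun best sj =>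
        let diff := sj - p.2
        if PySem.Int.mod diff total = 0 then
          let d := PySem.Int.floordiv diff total
          if 1 ≤ d && ltOptB (d, p.1) best then some (d, p.1) else best
        else best) acc) (sums.flatMap (fun sj => cnd1 total p.2 p.1 sj)) := by
    intro p
    exact stepspec_foldl
      (fun sj best =>
        let diff := sj - p.2
        if PySem.Int.mod diff total = 0 then
          let d := PySem.Int.floordiv diff total
          if 1 ≤ d && ltOptB (d, p.1) best then some (d, p.1) else best
        else best)
      (fun sj => cnd1 total p.2 p.1 sj)
      (fun sj => step_single total p.2 p.1 sj) sums
  have houter := stepspec_foldl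
    (fun p acc => sums.foldl (fun best sj =>
      let diff := sj - p.2
      if PySem.Int.mod diff total = 0 then
        let d := PySem.Int.floordiv diff total
        if 1 ≤ d && ltOptB (d, p.1) best then some (d, p.1) else best
      else best) acc)
    (fun p => sums.flatMap (fun sj => cnd1 total p.2 p.1 sj))
    hinner (PySem.List.enumerate sums)
  have hb : bestLoopB total sums
      = (PySem.List.enumerate sums).foldl (fun best p => sums.foldl (fun best sj =>
          let diff := sj - p.2
          if PySem.Int.mod diff total = 0 then
            let d := PySem.Int.floordiv diff total
            if 1 ≤ d && ltOptB (d, p.1) best then some (d, p.1) else best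
          else best) best) none := rfl
  have hspec := houter none
  constructor
  · intro hnone
    exact ((hspec.1 hnone).2)
  · intro m hm
    obtain ⟨hmem, hnlt, -⟩ := hspec.2 m hm
    refine ⟨?_, hnlt⟩
    rcases hmem with hx | hx
    · cases hx
    · exact hx

theorem mem_allC (l : List Int) (hT : l.sum ≠ 0) (m : Int × Int) :
    m ∈ allC l.sum (psums l 0)
      ↔ ∃ dn i : Nat, CmP l dn i ∧ m = ((dn : Int), (i : Int)) := by
  constructor
  · intro hm
    unfold allC at hm
    obtain ⟨p, hp, hm⟩ := List.mem_flatMap.mp hm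
    obtain ⟨sj, hsj, hm⟩ := List.mem_flatMap.mp hm
    rw [cnd1] at hm
    by_cases hcond : PySem.Int.mod (sj - p.2) l.sum = 0
        ∧ 1 ≤ PySem.Int.floordiv (sj - p.2) l.sum
    · rw [if_pos hcond] at hm
      rw [List.mem_singleton] at hm
      obtain ⟨k, hk, hpk⟩ := (PySem.List.mem_enumerate_iff _ _ _).mp hp
      obtain ⟨j, hj, hje⟩ := List.mem_iff_getElem.mp hsj
      subst hpk
      subst hje
      simp only [zero_add] at hm hcond
      have hkn : k < l.length := by rw [← length_psums l 0]; exact hk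
      have hjn : j < l.length := by rw [← length_psums l 0]; exact hj
      have hexact : PySem.Int.floordiv ((psums l 0)[j] - (psums l 0)[k]) l.sum * l.sum
          = (psums l 0)[j] - (psums l 0)[k] := by
        have h1 := PySem.Int.floordiv_mul_add_mod ((psums l 0)[j] - (psums l 0)[k]) l.sum
        rw [hcond.1, add_zero] at h1
        exact h1
      have hd1 := hcond.2
      have hcast : ((PySem.Int.floordiv ((psums l 0)[j] - (psums l 0)[k]) l.sum).toNat : Int)
          = PySem.Int.floordiv ((psums l 0)[j] - (psums l 0)[k]) l.sum :=
        Int.toNat_of_nonneg (by omega)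
      refine ⟨(PySem.Int.floordiv ((psums l 0)[j] - (psums l 0)[k]) l.sum).toNat, k,
        ⟨?_, hkn, j, hjn, ?_⟩, ?_⟩
      · omega
      · rw [hcast]
        rw [List.getD_eq_getElem _ _ hj, List.getD_eq_getElem _ _ hk]
        linarith [hexact]
      · rw [hm]
        rw [Prod.mk.injEq]
        exact ⟨hcast.symm, rfl⟩
    · rw [if_neg hcond] at hm
      cases hm
  · rintro ⟨dn, i, ⟨hd1, hi, j, hj, hps⟩, rfl⟩
    unfold allC
    have hi' : i < (psums l 0).length := by rw [length_psums]; exact hi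
    have hj' : j < (psums l 0).length := by rw [length_psums]; exact hj
    rw [List.mem_flatMap]
    refine ⟨((i : Int), (psums l 0)[i]), ?_, ?_⟩
    · rw [PySem.List.mem_enumerate_iff _ _ _]
      exact ⟨i, hi', by simp⟩
    · rw [List.mem_flatMap]
      refine ⟨(psums l 0)[j], List.getElem_mem _, ?_⟩
      rw [cnd1]
      have hdiff : (psums l 0)[j] - (psums l 0)[i] = (dn : Int) * l.sum := by
        rw [List.getD_eq_getElem _ _ hj', List.getD_eq_getElem _ _ hi'] at hps
        linarith [hps]
      have hm0 : PySem.Int.mod ((psums l 0)[j] - (psums l 0)[i]) l.sum = 0 :=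
        (PySem.Int.mod_eq_zero_iff_dvd _ _).mpr ⟨(dn : Int), by rw [hdiff]; ring⟩
      have hfd : PySem.Int.floordiv ((psums l 0)[j] - (psums l 0)[i]) l.sum = (dn : Int) := by
        have h1 := PySem.Int.floordiv_mul_add_mod ((psums l 0)[j] - (psums l 0)[i]) l.sum
        rw [hm0, add_zero] at h1
        exact mul_right_cancel₀ hT (h1.trans hdiff)
      simp only []
      rw [if_pos ⟨hm0, by rw [hfd]; exact_mod_cast hd1⟩]
      rw [List.mem_singleton, hfd]

-- existence form used for the minimal cycle count
def ExCm (l : List Int) (d : Nat) : Prop := ∃ i < l.length, CmP l d i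

@[reducible] def decExCm (l : List Int) : DecidablePred (ExCm l) := fun _d => by
  unfold ExCm
  haveI : DecidablePred (CmP l _d) := decCmP l _d
  infer_instance

theorem headD_eq_getD (xs : List Int) : xs.headD 0 = xs.getD 0 0 := by
  cases xs <;> simp

theorem B_eq (l : List Int) (hp : Pre_first_repeat_sum l) (h : ∃ t, ColA l t) :
    first_repeat_sum_alt l = wS l (tstar l h) := by
  have hne : l ≠ [] := hp.1
  have hn0 : 0 < l.length := List.length_pos_iff.mpr hne
  have halt : first_repeat_sum_alt l =
      (match firstDupB (psums l 0) PySem.Set.empty with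
       | some s => s
       | none =>
           if l.sum = 0 then (psums l 0).headD 0
           else
             match bestLoopB l.sum (psums l 0) with
             | some di => PySem.List.pyGetD (psums l 0) di.2 0 + di.1 * l.sum
             | none => 0) := by
    unfold first_repeat_sum_alt
    rw [sumsTotalB_eq l]
  rw [halt]
  have hfd := firstDup_run l hne h l.length 0 PySem.Set.empty (by omega) (by omega)
    (by
      intro x
      constructor
      · intro hx
        exact absurd hx (by simp [PySem.Set.empty, PySem.Set.contains])
      · rintro ⟨t, ht, -⟩
        omega)
    (by intro t ht; exact absurd ht (by omega))
  rw [List.drop_zero] at hfd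
  by_cases htn : tstar l h < l.length
  · rw [hfd.1 htn]
  · have hge : l.length ≤ tstar l h := by omega
    rw [hfd.2 hge]
    have hnodup : ∀ t < l.length, ¬ ColA l t := fun t ht => tstar_min l h (by omega)
    by_cases hT : l.sum = 0
    · rw [if_pos hT]
      have h1 := wS_closed l hne 1 0 hn0
      have h0 := wS_closed l hne 0 0 hn0
      simp only [Nat.one_mul, Nat.zero_mul, Nat.add_zero] at h1 h0
      have hcoln : ColA l l.length := by
        refine ⟨0, hn0, ?_⟩
        rw [h0, h1, hT]
        ring
      have hts : tstar l h = l.length := le_antisymm (tstar_le l h hcoln) hge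
      rw [hts, h1, hT, headD_eq_getD]
      ring
    · rw [if_neg hT]
      have hcolstar := tstar_col l h
      have hist : tstar l h % l.length < l.length := Nat.mod_lt _ hn0
      have hcst : 1 ≤ tstar l h / l.length :=
        (Nat.le_div_iff_mul_le hn0).mpr (by omega)
      have hteq : tstar l h = (tstar l h / l.length) * l.length + tstar l h % l.length := by
        conv_lhs => rw [← Nat.div_add_mod (tstar l h) l.length]
        rw [Nat.mul_comm]
      have hcol' : ColA l ((tstar l h / l.length) * l.length + tstar l h % l.length) := by
        rw [← hteq]; exact hcolstar
      obtain ⟨d0, hd01, hd0c, hcm0⟩ :=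
        (col_char l hne hT hnodup _ _ hist hcst).mp hcol'
      have hexD : ∃ d, ExCm l d := ⟨d0, tstar l h % l.length, hcm0.2.1, hcm0⟩
      haveI : DecidablePred (ExCm l) := decExCm l
      have hDex : ExCm l (Nat.find hexD) := Nat.find_spec hexD
      obtain ⟨iw, hiwn, hcmD⟩ := hDex
      have hexI : ∃ i, CmP l (Nat.find hexD) i := ⟨iw, hcmD⟩
      haveI : DecidablePred (CmP l (Nat.find hexD)) := decCmP l (Nat.find hexD)
      set D := Nat.find hexD with hDdef
      set i0 := Nat.find hexI with hi0def
      have hcmDi0 : CmP l D i0 := Nat.find_spec hexI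
      have hD1 : 1 ≤ D := hcmDi0.1
      have hi0n : i0 < l.length := hcmDi0.2.1
      have hcolD : ColA l (D * l.length + i0) :=
        (col_char l hne hT hnodup D i0 hi0n hD1).mpr ⟨D, hD1, le_rfl, hcmDi0⟩
      have hmin : ∀ t < D * l.length + i0, ¬ ColA l t := by
        intro t ht hcolt
        by_cases htn2 : t < l.length
        · exact hnodup t htn2 hcolt
        · have hitn : t % l.length < l.length := Nat.mod_lt _ hn0
          have hc1 : 1 ≤ t / l.length := (Nat.le_div_iff_mul_le hn0).mpr (by omega)
          have hteq2 : t = (t / l.length) * l.length + t % l.length := by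
            conv_lhs => rw [← Nat.div_add_mod t l.length]
            rw [Nat.mul_comm]
          rw [hteq2] at hcolt
          obtain ⟨d, hd1, hdc, hcm⟩ :=
            (col_char l hne hT hnodup _ _ hitn hc1).mp hcolt
          have hDled : D ≤ d := Nat.find_min' hexD ⟨t % l.length, hcm.2.1, hcm⟩
          have hcD : t / l.length = D := by
            by_contra hne2
            have hx1 : D + 1 ≤ t / l.length := by omega
            have hx2 : (D + 1) * l.length ≤ (t / l.length) * l.length :=
              Nat.mul_le_mul_right _ hx1
            have hx3 : (D + 1) * l.length = D * l.length + l.length := by ring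
            omega
          rw [hcD] at hteq2
          have hlti0 : t % l.length < i0 := by omega
          have hdD : d = D := by omega
          exact absurd (hdD ▸ hcm) (Nat.find_min hexI hlti0)
      have htseq : tstar l h = D * l.length + i0 := by
        have hle1 := tstar_le l h hcolD
        have hle2 : ¬ tstar l h < D * l.length + i0 :=
          fun hlt => hmin _ hlt hcolstar
        omega
      have hbm := bestLoopB_minspec l.sum (psums l 0)
      have hmemD : ((D : Int), (i0 : Int)) ∈ allC l.sum (psums l 0) :=
        (mem_allC l hT _).mpr ⟨D, i0, hcmDi0, rfl⟩
      cases hbl : bestLoopB l.sum (psums l 0) with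
      | none =>
          rw [hbm.1 hbl] at hmemD
          cases hmemD
      | some m =>
          obtain ⟨hmF, hmmin⟩ := hbm.2 m hbl
          obtain ⟨dm, im, hcmm, hmeq⟩ := (mem_allC l hT m).mp hmF
          have hnd : ¬ lltP ((D : Int), (i0 : Int)) m := hmmin _ hmemD
          have hDdm : D ≤ dm := Nat.find_min' hexD ⟨im, hcmm.2.1, hcmm⟩
          have hnd2 : ¬ lltP m ((D : Int), (i0 : Int)) := by
            rw [hmeq]
            rintro (hlt | ⟨heq1, hlt2⟩)
            · simp only [] at hlt
              have : dm < D := by exact_mod_cast hlt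
              omega
            · simp only [] at heq1 hlt2
              have hdmD : dm = D := by exact_mod_cast heq1
              have him : im < i0 := by exact_mod_cast hlt2
              exact absurd (hdmD ▸ hcmm) (Nat.find_min hexI him)
          have hm_eq : m = ((D : Int), (i0 : Int)) := by
            rcases llt_total m ((D : Int), (i0 : Int)) with hx | hx | hx
            · exact absurd hx hnd2
            · exact hx
            · exact absurd hx hnd
          rw [hm_eq]
          simp only []
          rw [PySem.List.pyGetD_natCast, htseq, wS_closed l hne D i0 hi0n]

-- ===== VERDICT (by name: the statement is the Claim_ definition above) =====
theorem first_repeat_sum_spec : Claim_equal_first_repeat_sum := by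
  intro input _hdom hpre
  unfold Spec_first_repeat_sum
  obtain ⟨t0, ht0, _⟩ := exists_col_of_pre input hpre
  have h : ∃ t, ColA input t := ⟨t0, ht0⟩
  rw [A_eq input hpre h, B_eq input hpre h]
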